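-- pv_equiv track=rewrite | github.com/villevaara/text_reuse | code/final/lib/tr_bookcontainer.py | filter_pagetext_list_headers
-- ===== SOURCE A (Python) =====
-- def filter_pagetext_list_headers(pagetext_list):
--     filtered_list = list()
--     potential_skipline = ""
--
--     for line in pagetext_list:
--
--         if line[0:2] == "# " or line[0:3] == "## ":
--             potential_skipline = line
--
--         elif len(potential_skipline) != 0:
--             if line != "\n":
--                 filtered_list.append(potential_skipline)
--                 filtered_list.append(line)
--             potential_skipline = ""
--
--         else:
--             filtered_list.append(line)
--
--     return filtered_list
-- ===== SOURCE B (Python) =====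
-- def filter_pagetext_list_headers(pagetext_list):
--     out = []
--     i = 0
--     n = len(pagetext_list)
--     while i < n:
--         line = pagetext_list[i]
--         if line.startswith("# ") or line.startswith("## "):
--             # skip over a run of consecutive header lines, keeping the last one
--             while i + 1 < n and (pagetext_list[i + 1].startswith("# ")
--                                  or pagetext_list[i + 1].startswith("## ")):
--                 i += 1
--             if i + 1 < n:
--                 nxt = pagetext_list[i + 1]
--                 if nxt != "\n":
--                     out.append(pagetext_list[i])
--                     out.append(nxt)
--                 i += 2
--             else:
--                 i += 1
--         else:
--             out.append(line)
--             i += 1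
--     return out
-- ===== Notes on version B (the rewrite author's own statement) =====
-- stated objective: alternative
-- what changed: Replaces A's flat per-line loop threading a pending-header state variable by an index-based while loop with explicit look-ahead that consumes each run of consecutive header lines plus its following line as a unit (inner skip loop keeps the last header, then the successor decides emission).
import Mathlib
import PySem

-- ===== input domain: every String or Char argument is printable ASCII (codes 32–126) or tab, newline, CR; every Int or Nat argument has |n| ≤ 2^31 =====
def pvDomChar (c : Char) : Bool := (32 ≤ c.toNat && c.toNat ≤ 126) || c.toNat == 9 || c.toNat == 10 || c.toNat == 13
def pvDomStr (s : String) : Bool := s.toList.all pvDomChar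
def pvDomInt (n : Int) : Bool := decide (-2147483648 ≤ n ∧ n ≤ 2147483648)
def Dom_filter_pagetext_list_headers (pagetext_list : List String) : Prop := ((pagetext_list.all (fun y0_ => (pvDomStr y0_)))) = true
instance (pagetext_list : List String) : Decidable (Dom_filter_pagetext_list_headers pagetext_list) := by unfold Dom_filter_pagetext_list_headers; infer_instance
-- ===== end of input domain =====

-- B replaces A's threaded pending-header state by an index-based loop with explicit
-- look-ahead that consumes each run of header lines plus its successor as a unit (objective: alternative).

-- ===== PORT A =====
-- A: flat loop over the lines threading (filtered_list, potential_skipline); pvStepA is the loop body.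
def pvStepA (st : List String × String) (line : String) : List String × String :=
  if PySem.Str.slice line (some 0) (some 2) = "# " ∨
     PySem.Str.slice line (some 0) (some 3) = "## " then
    (st.1, line)
  else if PySem.Str.len st.2 ≠ 0 then
    ((if line ≠ "\n" then st.1 ++ [st.2, line] else st.1), "")
  else
    (st.1 ++ [line], "")

def filter_pagetext_list_headers (pagetext_list : List String) : List String :=
  (pagetext_list.foldl pvStepA (([] : List String), "")).1

-- ===== PORT B =====
-- B helper: is this line a header line?
def pvIsHdr (s : String) : Bool :=
  PySem.Str.startswith s "# " || PySem.Str.startswith s "## "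

-- B inner while loop: skip forward over a run of consecutive header lines, return the last index.
def pvSkipRun (arr : List String) (n i : Nat) : Nat :=
  if h : i + 1 < n ∧ pvIsHdr (arr.getD (i + 1) "") = true then
    pvSkipRun arr n (i + 1)
  else i
termination_by n - i
decreasing_by omega

theorem pvSkipRun_ge (arr : List String) (n i : Nat) : i ≤ pvSkipRun arr n i := by
  unfold pvSkipRun
  split
  · exact Nat.le_trans (Nat.le_succ i) (pvSkipRun_ge arr n (i + 1))
  · exact Nat.le_refl i
termination_by n - i
decreasing_by omega

-- B outer while loop over the index i.
def pvLoopB (arr : List String) (n i : Nat) : List String :=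
  if h : i < n then
    if pvIsHdr (arr.getD i "") then
      if hj : pvSkipRun arr n i + 1 < n then
        (if arr.getD (pvSkipRun arr n i + 1) "" ≠ "\n" then
           [arr.getD (pvSkipRun arr n i) "", arr.getD (pvSkipRun arr n i + 1) ""]
         else []) ++ pvLoopB arr n (pvSkipRun arr n i + 2)
      else pvLoopB arr n (pvSkipRun arr n i + 1)
    else arr.getD i "" :: pvLoopB arr n (i + 1)
  else []
termination_by n - i
decreasing_by
  · have := pvSkipRun_ge arr n i; omega
  · have := pvSkipRun_ge arr n i; omega
  · omega

def filter_pagetext_list_headers_alt (pagetext_list : List String) : List String :=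
  pvLoopB pagetext_list pagetext_list.length 0

-- ===== PRECONDITION & SPEC =====
def Spec_filter_pagetext_list_headers (pagetext_list : List String) (out : List String) : Prop := out = filter_pagetext_list_headers_alt pagetext_list
instance (pagetext_list : List String) (out : List String) : Decidable (Spec_filter_pagetext_list_headers pagetext_list out) := by unfold Spec_filter_pagetext_list_headers; infer_instance

-- ===== CLAIM (what is proved, stated in full; the proofs are below) =====
def Claim_equal_filter_pagetext_list_headers : Prop := ∀ (pagetext_list : List String), Dom_filter_pagetext_list_headers pagetext_list → Spec_filter_pagetext_list_headers pagetext_list (filter_pagetext_list_headers pagetext_list)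

-- ===== LEMMAS AND PROOFS =====

theorem pv_slice_take (s : String) (k : Nat) :
    (PySem.Str.slice s (some 0) (some (k:Int))).toList = s.toList.take k := by
  simp [PySem.List.slice_zero_start, PySem.List.slice_to_natCast]

-- A's header test and B's header test agree.
theorem hdr_iff (s : String) :
    (PySem.Str.slice s (some 0) (some 2) = "# " ∨
     PySem.Str.slice s (some 0) (some 3) = "## ") ↔ pvIsHdr s = true := by
  have h2 := pv_slice_take s 2
  have h3 := pv_slice_take s 3
  push_cast at h2 h3
  simp only [pvIsHdr, Bool.or_eq_true, PySem.Str.startswith_eq, PySem.Chars.startswith_iff,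
    String.ext_iff, h2, h3]
  constructor
  · rintro (h | h)
    · left; rw [List.prefix_iff_eq_take]; simpa using h.symm
    · right; rw [List.prefix_iff_eq_take]; simpa using h.symm
  · rintro (h | h)
    · left; rw [List.prefix_iff_eq_take] at h; simpa using h.symm
    · right; rw [List.prefix_iff_eq_take] at h; simpa using h.symm

theorem hdr_len_ne (s : String) (h : pvIsHdr s = true) : PySem.Str.len s ≠ 0 := by
  simp only [pvIsHdr, Bool.or_eq_true, PySem.Str.startswith_eq, PySem.Chars.startswith_iff] at h
  have h2 : 2 ≤ s.length := by
    rcases h with h | h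
    · have := h.length_le; simp at this; omega
    · have := h.length_le; simp at this; omega
  simp only [PySem.Str.len_eq, String.length_toList]
  omega

-- functional reformulation of A's fold (same branch decisions, accumulator dropped)
def pvGoA : List String → String → List String
  | [], _ => []
  | line :: rest, pend =>
    if PySem.Str.slice line (some 0) (some 2) = "# " ∨
       PySem.Str.slice line (some 0) (some 3) = "## " then
      pvGoA rest line
    else if PySem.Str.len pend ≠ 0 then
      (if line ≠ "\n" then [pend, line] else []) ++ pvGoA rest ""
    else
      line :: pvGoA rest ""

theorem pvGoA_cons (line : String) (rest : List String) (pend : String) :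
    pvGoA (line :: rest) pend =
      if PySem.Str.slice line (some 0) (some 2) = "# " ∨
         PySem.Str.slice line (some 0) (some 3) = "## " then
        pvGoA rest line
      else if PySem.Str.len pend ≠ 0 then
        (if line ≠ "\n" then [pend, line] else []) ++ pvGoA rest ""
      else
        line :: pvGoA rest "" := rfl

theorem foldA_eq (l : List String) (acc : List String) (pend : String) :
    (l.foldl pvStepA (acc, pend)).1 = acc ++ pvGoA l pend := by
  induction l generalizing acc pend with
  | nil => simp [pvGoA]
  | cons line rest ih =>
    rw [List.foldl_cons, pvGoA_cons]
    by_cases h1 : (PySem.Str.slice line (some 0) (some 2) = "# " ∨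
        PySem.Str.slice line (some 0) (some 3) = "## ")
    · rw [if_pos h1,
        show pvStepA (acc, pend) line = (acc, line) from by simp only [pvStepA, if_pos h1]]
      exact ih acc line
    · rw [if_neg h1]
      by_cases h2 : PySem.Str.len pend ≠ 0
      · rw [if_pos h2,
          show pvStepA (acc, pend) line =
            ((if line ≠ "\n" then acc ++ [pend, line] else acc), "") from by
              simp only [pvStepA, if_neg h1, if_pos h2],
          ih]
        by_cases h3 : line ≠ "\n" <;> simp [h3]
      · rw [if_neg h2,
          show pvStepA (acc, pend) line = (acc ++ [line], "") from by
            simp only [pvStepA, if_neg h1, if_neg h2],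
          ih]
        simp

theorem pv_drop_cons (arr : List String) (i : Nat) (hi : i < arr.length) :
    arr.drop i = arr.getD i "" :: arr.drop (i+1) := by
  rw [List.getD_eq_getElem _ _ hi]
  exact List.drop_eq_getElem_cons hi

-- the run of header lines starting at a header line i collapses to the last header plus look-ahead
theorem runS (arr : List String) (i : Nat) (hi : i < arr.length)
    (hh : pvIsHdr (arr.getD i "") = true) :
    pvGoA (arr.drop (i+1)) (arr.getD i "") =
      (if pvSkipRun arr arr.length i + 1 < arr.length then
        (if arr.getD (pvSkipRun arr arr.length i + 1) "" ≠ "\n" then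
           [arr.getD (pvSkipRun arr arr.length i) "",
            arr.getD (pvSkipRun arr arr.length i + 1) ""]
         else []) ++ pvGoA (arr.drop (pvSkipRun arr arr.length i + 2)) ""
      else []) := by
  by_cases hc : i + 1 < arr.length ∧ pvIsHdr (arr.getD (i + 1) "") = true
  · have hs : pvSkipRun arr arr.length i = pvSkipRun arr arr.length (i+1) := by
      rw [pvSkipRun, dif_pos hc]
    rw [pv_drop_cons arr (i+1) hc.1, pvGoA_cons]
    rw [if_pos ((hdr_iff _).mpr hc.2), hs]
    exact runS arr (i+1) hc.1 hc.2
  · have hs : pvSkipRun arr arr.length i = i := by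
      rw [pvSkipRun, dif_neg hc]
    rw [hs]
    by_cases h1 : i + 1 < arr.length
    · have hnh : ¬ (PySem.Str.slice (arr.getD (i+1) "") (some 0) (some 2) = "# " ∨
          PySem.Str.slice (arr.getD (i+1) "") (some 0) (some 3) = "## ") := by
        intro hA
        exact hc ⟨h1, (hdr_iff _).mp hA⟩
      rw [if_pos h1, pv_drop_cons arr (i+1) h1, pvGoA_cons]
      rw [if_neg hnh, if_pos (hdr_len_ne _ hh)]
    · rw [if_neg h1, List.drop_eq_nil_of_le (by omega), pvGoA]
termination_by arr.length - i
decreasing_by omega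

theorem loopB_eq (arr : List String) (i : Nat) :
    pvLoopB arr arr.length i = pvGoA (arr.drop i) "" := by
  rw [pvLoopB]
  by_cases hi : i < arr.length
  · rw [dif_pos hi, pv_drop_cons arr i hi, pvGoA_cons]
    by_cases hh : pvIsHdr (arr.getD i "") = true
    · rw [if_pos hh, if_pos ((hdr_iff _).mpr hh), runS arr i hi hh]
      by_cases hj : pvSkipRun arr arr.length i + 1 < arr.length
      · have := pvSkipRun_ge arr arr.length i
        rw [dif_pos hj, if_pos hj, loopB_eq arr (pvSkipRun arr arr.length i + 2)]
      · rw [dif_neg hj, if_neg hj, pvLoopB, dif_neg hj]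
    · rw [if_neg hh, if_neg (fun hA => hh ((hdr_iff _).mp hA)),
        if_neg (by simp [PySem.Str.len_eq] : ¬ PySem.Str.len "" ≠ 0)]
      rw [loopB_eq arr (i+1)]
  · rw [dif_neg hi, List.drop_eq_nil_of_le (by omega), pvGoA]
termination_by arr.length - i
decreasing_by
  · have := pvSkipRun_ge arr arr.length i; omega
  · omega

-- ===== VERDICT (by name: the statement is the Claim_ definition above) =====
theorem filter_pagetext_list_headers_spec : Claim_equal_filter_pagetext_list_headers := by
  intro l _
  unfold Spec_filter_pagetext_list_headers filter_pagetext_list_headers filter_pagetext_list_headers_alt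
  rw [foldA_eq, loopB_eq, List.drop_zero, List.nil_append]
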